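-- pv_equiv track=rewrite | github.com/royale-glitch/APCS-12 | Dr_Programmer.py | all_substring
-- ===== SOURCE A (Python) =====
-- def all_substring(binary):
--     res = [binary[i: j] for i in range(len(binary))
--           for j in range(i + 1, len(binary) + 1)]
--     candidates = []
--     for i in res:
--         zero_count = 0
--         one_count = 0
--         for j in i:
--             if j == "0":
--                 zero_count += 1
--             else:
--                 one_count += 1
--         if zero_count > one_count:
--             candidates.append(i)
--     return candidates
-- ===== SOURCE B (Python) =====
-- def all_substring(binary):
--     n = len(binary)
--     res = []
--     for i in range(n):
--         bal = 0
--         cur = []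
--         for j in range(i, n):
--             c = binary[j]
--             cur.append(c)
--             bal += 1 if c == "0" else -1
--             if bal > 0:
--                 res.append("".join(cur))
--     return res
-- ===== Notes on version B (the rewrite author's own statement) =====
-- stated objective: faster
-- what changed: Replaces the materialised list of all O(n^2) substrings plus a per-substring counting pass with a per-start-index incremental balance (+1 for '0', -1 otherwise) decided in O(1) per end index, building only the qualifying substrings.
import Mathlib
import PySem

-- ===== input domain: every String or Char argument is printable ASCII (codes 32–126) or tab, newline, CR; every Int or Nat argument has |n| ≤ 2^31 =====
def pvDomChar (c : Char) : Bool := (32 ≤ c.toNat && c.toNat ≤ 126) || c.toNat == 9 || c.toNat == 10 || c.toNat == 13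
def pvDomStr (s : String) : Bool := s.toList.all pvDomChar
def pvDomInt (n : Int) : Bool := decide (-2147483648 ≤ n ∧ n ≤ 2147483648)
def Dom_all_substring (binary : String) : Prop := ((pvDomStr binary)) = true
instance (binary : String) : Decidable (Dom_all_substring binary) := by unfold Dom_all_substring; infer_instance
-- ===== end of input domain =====

-- B replaces the list of all substrings plus a per-substring counting pass with an
-- incremental balance per start index, appending only qualifying substrings (faster, asymptotic).


-- ===== PORT A =====
def all_substring (binary : String) : List String :=
  let s := binary.toList
  let n : Int := s.length
  let res : List String :=
    (PySem.List.pyRange 0 n 1).flatMap (fun i =>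
      (PySem.List.pyRange (i + 1) (n + 1) 1).map (fun j =>
        String.ofList (PySem.List.slice s (some i) (some j))))
  res.foldl (fun candidates i =>
    let counts := i.toList.foldl
      (fun (p : Int × Int) j => if j = '0' then (p.1 + 1, p.2) else (p.1, p.2 + 1)) (0, 0)
    if counts.1 > counts.2 then candidates ++ [i] else candidates) []

-- ===== PORT B =====
-- inner loop of B: remaining chars, current substring chars, running balance, accumulator
def altInner : List Char → List Char → Int → List String → List String
  | [], _, _, acc => acc
  | c :: rest, cur, bal, acc =>
    let cur' := cur ++ [c]
    let bal' := bal + (if c = '0' then 1 else -1)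
    altInner rest cur' bal' (if bal' > 0 then acc ++ [String.ofList cur'] else acc)

def all_substring_alt (binary : String) : List String :=
  let s := binary.toList
  (List.range s.length).foldl (fun acc i => altInner (s.drop i) [] 0 acc) []

-- ===== PRECONDITION & SPEC =====
def Spec_all_substring (binary : String) (out : List String) : Prop := out = all_substring_alt binary
instance (binary : String) (out : List String) : Decidable (Spec_all_substring binary out) := by unfold Spec_all_substring; infer_instance

-- ===== CLAIM (what is proved, stated in full; the proofs are below) =====
def Claim_equal_all_substring : Prop := ∀ (binary : String), Dom_all_substring binary → Spec_all_substring binary (all_substring binary)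

-- ===== LEMMAS AND PROOFS =====

-- running balance of a chunk: +1 per '0', -1 per other char
def balInt (l : List Char) : Int := l.foldl (fun b c => b + (if c = '0' then 1 else -1)) 0

-- the nonempty prefixes of t, each extending cur, that have positive balance (spec of B's inner loop)
def prefGood (cur : List Char) : List Char → List String
  | [] => []
  | c :: rest =>
      (if balInt (cur ++ [c]) > 0 then [String.ofList (cur ++ [c])] else []) ++ prefGood (cur ++ [c]) rest

theorem balInt_append_singleton (l : List Char) (c : Char) :
    balInt (l ++ [c]) = balInt l + (if c = '0' then 1 else -1) := by
  simp [balInt, List.foldl_append]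

theorem altInner_eq (t : List Char) : ∀ (cur : List Char) (acc : List String),
    altInner t cur (balInt cur) acc = acc ++ prefGood cur t := by
  induction t with
  | nil => intro cur acc; simp [altInner, prefGood]
  | cons c rest ih =>
    intro cur acc
    rw [altInner, prefGood]
    rw [← balInt_append_singleton cur c, ih (cur ++ [c])]
    split_ifs with h <;> simp

-- the counting loop of A, related to the balance
theorem counts_foldl (l : List Char) : ∀ (a b : Int),
    l.foldl (fun (p : Int × Int) j => if j = '0' then (p.1 + 1, p.2) else (p.1, p.2 + 1)) (a, b)
      = (a + (l.countP (fun c => c = '0') : Int),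
         b + (l.countP (fun c => ¬ (c = '0')) : Int)) := by
  induction l with
  | nil => intro a b; simp
  | cons c rest ih =>
    intro a b
    by_cases h : c = '0' <;> simp [h, ih] <;> ring

theorem balInt_eq_counts (l : List Char) :
    balInt l = (l.countP (fun c => c = '0') : Int) - (l.countP (fun c => ¬ (c = '0')) : Int) := by
  induction l using List.reverseRecOn with
  | nil => simp [balInt]
  | append_singleton rest c ih =>
    rw [balInt_append_singleton, ih]
    by_cases h : c = '0' <;> simp [h, List.countP_append] <;> ring

-- A's test on a substring equals B's balance test
def goodB (str : String) : Bool :=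
  decide ((str.toList.countP (fun c => c = '0') : Int) > (str.toList.countP (fun c => ¬ (c = '0')) : Int))

theorem good_iff_bal (l : List Char) : goodB (String.ofList l) = decide (balInt l > 0) := by
  simp only [goodB, balInt_eq_counts, String.toList_ofList, gt_iff_lt, sub_pos]

-- A's filtered prefix list per start index equals prefGood
theorem filter_prefixes (t : List Char) : ∀ (cur : List Char),
    ((List.range t.length).map (fun k => String.ofList (cur ++ t.take (k + 1)))).filter goodB
      = prefGood cur t := by
  induction t with
  | nil => intro cur; simp [prefGood]
  | cons c rest ih =>
    intro cur
    rw [prefGood, List.length_cons, List.range_succ_eq_map]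
    simp only [List.map_cons, List.map_map, List.filter_cons]
    have ht : (c :: rest).take (0 + 1) = [c] := rfl
    rw [ht, good_iff_bal]
    have hmap : ((List.range rest.length).map
        ((fun k => String.ofList (cur ++ (c :: rest).take (k + 1))) ∘ (fun i => i + 1)))
        = (List.range rest.length).map (fun k => String.ofList ((cur ++ [c]) ++ rest.take (k + 1))) := by
      apply List.map_congr_left; intro k _; simp
    rw [hmap, ih (cur ++ [c])]
    by_cases h : balInt (cur ++ [c]) > 0 <;> simp [h]

-- ===== VERDICT (by name: the statement is the Claim_ definition above) =====
theorem all_substring_spec : Claim_equal_all_substring := by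
  intro binary _
  unfold Spec_all_substring all_substring all_substring_alt
  simp only []
  set s := binary.toList with hs
  -- B side: fold of altInner = flatMap of prefGood
  have hB : (List.range s.length).foldl (fun acc i => altInner (s.drop i) [] 0 acc) []
      = (List.range s.length).flatMap (fun i => prefGood [] (s.drop i)) := by
    have : ∀ (l : List ℕ) (acc : List String),
        l.foldl (fun acc i => altInner (s.drop i) [] 0 acc) acc
          = acc ++ l.flatMap (fun i => prefGood [] (s.drop i)) := by
      intro l
      induction l with
      | nil => intro acc; simp
      | cons i rest ih =>
        intro acc
        have h0 : (0 : Int) = balInt [] := by simp [balInt]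
        simp only [List.foldl_cons, List.flatMap_cons]
        rw [h0, altInner_eq, ← h0, ih, List.append_assoc]
    simpa using this (List.range s.length) []
  rw [hB]
  -- A side: fold with conditional append = filter
  rw [PySem.List.foldl_append_ite_eq_filter]
  rw [List.nil_append]
  -- the per-substring counting test is goodB
  have hfilter : ∀ (l : List String),
      l.filter (fun i =>
        decide ((i.toList.foldl (fun (p : Int × Int) j =>
          if j = '0' then (p.1 + 1, p.2) else (p.1, p.2 + 1)) (0, 0)).1
          > (i.toList.foldl (fun (p : Int × Int) j =>
          if j = '0' then (p.1 + 1, p.2) else (p.1, p.2 + 1)) (0, 0)).2)) = l.filter goodB := by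
    intro l
    apply List.filter_congr
    intro x _
    rw [counts_foldl]
    simp [goodB]
  rw [hfilter, List.filter_flatMap]
  -- ranges over Int become ranges over Nat
  rw [show ((s.length : Int)) = ((s.length : Nat) : Int) from rfl, PySem.List.pyRange_zero_natCast]
  rw [List.flatMap_map]
  apply List.flatMap_congr
  intro i hi
  rw [List.mem_range] at hi
  have hlen : ((↑s.length + 1 : Int) - (↑i + 1)).toNat = (s.drop i).length := by
    simp [List.length_drop]
  rw [PySem.List.pyRange_one, hlen, List.map_map]
  have hmap2 : ((fun j => String.ofList (PySem.List.slice s (some ↑i) (some j))) ∘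
      (fun k : Nat => (↑i + 1 : Int) + ↑k))
      = fun k : Nat => String.ofList ([] ++ (s.drop i).take (k + 1)) := by
    funext k
    simp only [Function.comp, List.nil_append]
    rw [show ((↑i + 1 : Int) + (↑k : Int)) = ((i : Int) + ((k + 1 : Nat) : Int)) by push_cast; ring]
    rw [PySem.List.slice_natCast_add]
  rw [hmap2]
  exact filter_prefixes (s.drop i) []
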